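-- pv_equiv track=rewrite | github.com/ksj1368/Algorithm | 프로그래머스/1/135808. 과일 장수/과일 장수.py | solution
-- ===== SOURCE A (Python) =====
-- def solution(k, m, score):
--     answer = 0
--     while len(score)%m != 0:
--         s_min = min(score)
--         score.remove(s_min)
--     score = sorted(score)
--     for i in range(0, len(score), m):
--         answer += score[i]*m
--     return answer
-- ===== SOURCE B (Python) =====
-- def solution(k, m, score):
--     s = sorted(score)
--     r = len(s) % m
--     return sum(s[i] * m for i in range(r, len(s), m))
-- ===== Notes on version B (the rewrite author's own statement) =====
-- stated objective: faster
-- what changed: A repeatedly scans the whole list with min() and remove() to trim it (O(n) per removed element) and then sorts and indexes from 0; B sorts once and sums every m-th element starting at index len%m, with no removal loop at all.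
import Mathlib
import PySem

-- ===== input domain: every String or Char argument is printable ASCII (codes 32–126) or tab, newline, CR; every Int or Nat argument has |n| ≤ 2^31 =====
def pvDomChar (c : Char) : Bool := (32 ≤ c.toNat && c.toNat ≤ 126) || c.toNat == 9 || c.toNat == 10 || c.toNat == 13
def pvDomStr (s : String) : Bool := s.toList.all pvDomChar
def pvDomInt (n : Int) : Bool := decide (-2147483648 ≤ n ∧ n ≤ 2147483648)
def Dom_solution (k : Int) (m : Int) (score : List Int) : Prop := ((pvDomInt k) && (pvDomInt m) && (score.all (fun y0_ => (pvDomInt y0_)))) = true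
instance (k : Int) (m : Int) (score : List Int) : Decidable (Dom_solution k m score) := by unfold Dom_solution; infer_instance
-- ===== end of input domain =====

-- B sorts once and sums every m-th element from index len%m, replacing A's repeated min()+remove() trimming loop.
-- A mutates its `score` argument in place (remove()); the equivalence proved here is about the return value only.


-- ===== PORT A =====
-- the `while len(score)%m != 0: score.remove(min(score))` loop; the `none` branch of min?
-- is unreachable for m ≠ 0 (an empty list has len % m == 0)
def aLoop (m : Int) (score : List Int) : List Int :=
  if PySem.Int.mod (score.length : Int) m = 0 then score
  else
    match hmin : PySem.List.min? score (fun x => x) with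
    | none => score
    | some s_min =>
      aLoop m ((PySem.List.remove? score s_min).getD [])
termination_by score.length
decreasing_by
  have hmem := PySem.List.min?_mem hmin
  rw [PySem.List.remove?_eq_some_erase score s_min hmem, Option.getD_some]
  have h1 := List.length_erase_of_mem hmem
  have h2 := List.length_pos_of_mem hmem
  omega

def solution (k : Int) (m : Int) (score : List Int) : Int :=
  let score2 := PySem.List.sorted (aLoop m score) (fun x => x)
  -- score[i] is always in range for the generated indices, so pyGetD is exact
  (PySem.List.pyRange 0 (score2.length : Int) m).foldl
    (fun answer i => answer + PySem.List.pyGetD score2 i 0 * m) 0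

-- ===== PORT B =====
def solution_alt (k : Int) (m : Int) (score : List Int) : Int :=
  let s := PySem.List.sorted score (fun x => x)
  let r := PySem.Int.mod (s.length : Int) m
  -- s[i] is always in range for the generated indices, so pyGetD is exact
  (PySem.List.pyRange r (s.length : Int) m).foldl
    (fun acc i => acc + PySem.List.pyGetD s i 0 * m) 0

-- ===== PRECONDITION & SPEC =====
-- Pre_ excludes only m = 0, where Python's `len(score) % m` raises ZeroDivisionError in both A and B.
def Pre_solution (k : Int) (m : Int) (score : List Int) : Prop := m ≠ 0
instance (k : Int) (m : Int) (score : List Int) : Decidable (Pre_solution k m score) := by unfold Pre_solution; infer_instance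
def pvWitness_solution : Int × Int × List Int := (0, 3, [1, 2, 3, 1])

def Spec_solution (k : Int) (m : Int) (score : List Int) (out : Int) : Prop := out = solution_alt k m score
instance (k : Int) (m : Int) (score : List Int) (out : Int) : Decidable (Spec_solution k m score out) := by unfold Spec_solution; infer_instance

-- ===== CLAIM (what is proved, stated in full; the proofs are below) =====
def Claim_equal_solution : Prop := ∀ (k : Int) (m : Int) (score : List Int), Dom_solution k m score → Pre_solution k m score → Spec_solution k m score (solution k m score)

-- ===== LEMMAS AND PROOFS =====

-- removing the minimum of a nonempty list and sorting = dropping the head of the sorted list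
theorem sorted_erase_min (xs : List Int) (mn : Int)
    (h : PySem.List.min? xs (fun x => x) = some mn) :
    PySem.List.sorted (xs.erase mn) (fun x => x) = (PySem.List.sorted xs (fun x => x)).tail := by
  have hmem := PySem.List.min?_mem h
  have hminv := PySem.List.min?_isMin h
  cases hS : PySem.List.sorted xs (fun x => x) with
  | nil =>
    exact absurd ((PySem.List.sorted_eq_nil_iff xs (fun x => x) false).mp hS ▸ hmem) (List.not_mem_nil)
  | cons a t =>
    have hperm : (PySem.List.sorted xs (fun x => x)).Perm xs :=
      PySem.List.sorted_perm xs (fun x => x) false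
    rw [hS] at hperm
    have ha : a ∈ xs := hperm.mem_iff.mp (List.mem_cons_self)
    have hle := PySem.List.key_head_sorted_le xs (fun x => x) hS
    have hamn : a = mn := le_antisymm (hle mn hmem) (hminv a ha)
    have hpw : t.Pairwise (· ≤ ·) := by
      have hp := PySem.List.sorted_pairwise xs (fun x => x)
      rw [hS] at hp
      exact (List.pairwise_cons.mp hp).2
    have hperm2 : t.Perm (xs.erase mn) := by
      have he := (hperm.symm).erase mn
      rw [hamn] at he
      rw [List.erase_cons_head] at he
      exact he.symm
    simpa using PySem.List.sorted_id_eq_of_perm_of_pairwise (xs.erase mn) t hperm2 hpw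

theorem tail_drop_eq (l : List Int) (k : Nat) : l.tail.drop k = l.drop (k + 1) := by
  cases l <;> simp

-- the trimming loop, seen through `sorted`: it drops the first len % m elements (0 < m)
theorem aLoop_sorted (m : Int) (hm : 0 < m) (xs : List Int) :
    PySem.List.sorted (aLoop m xs) (fun x => x)
      = (PySem.List.sorted xs (fun x => x)).drop (xs.length % m.toNat) := by
  have hmm : m = ((m.toNat : Nat) : Int) := by omega
  have H : ∀ n (xs : List Int), xs.length = n →
      PySem.List.sorted (aLoop m xs) (fun x => x)
        = (PySem.List.sorted xs (fun x => x)).drop (xs.length % m.toNat) := by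
    intro n
    induction n using Nat.strong_induction_on with
    | _ n ih =>
      intro xs hn
      rw [aLoop]
      by_cases h0 : PySem.Int.mod (xs.length : Int) m = 0
      · rw [if_pos h0]
        have hz : xs.length % m.toNat = 0 := by
          rw [hmm, PySem.Int.mod_natCast] at h0
          exact_mod_cast h0
        rw [hz, List.drop_zero]
      · rw [if_neg h0]
        have hxs : xs ≠ [] := by
          rintro rfl
          exact h0 (by simpa using (PySem.Int.mod_eq_zero_iff_dvd 0 m).mpr (dvd_zero m))
        split
        · next hnone => exact absurd ((PySem.List.min?_eq_none_iff xs (fun x => x)).mp hnone) hxs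
        · next mn hmn =>
          have hmem := PySem.List.min?_mem hmn
          rw [PySem.List.remove?_eq_some_erase xs mn hmem, Option.getD_some]
          have hlen : (xs.erase mn).length = xs.length - 1 := List.length_erase_of_mem hmem
          have hpos : 0 < xs.length := List.length_pos_of_mem hmem
          have hIH := ih (xs.length - 1) (by omega) (xs.erase mn) hlen
          rw [hIH, hlen, sorted_erase_min xs mn hmn]
          have hr : xs.length % m.toNat ≠ 0 := by
            intro hz
            apply h0
            rw [hmm, PySem.Int.mod_natCast, hz]
            rfl
          have hMpos : 0 < m.toNat := by omega
          have hM1 : m.toNat ≠ 1 := by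
            intro h1
            exact hr (by rw [h1, Nat.mod_one])
          have hlt : (xs.length - 1) % m.toNat < m.toNat := Nat.mod_lt _ hMpos
          have hkey : ((xs.length - 1) % m.toNat + 1) % m.toNat = xs.length % m.toNat := by
            conv_rhs => rw [show xs.length = (xs.length - 1) + 1 from by omega, Nat.add_mod,
              Nat.mod_eq_of_lt (show 1 < m.toNat from by omega)]
          have harith : (xs.length - 1) % m.toNat + 1 = xs.length % m.toNat := by
            rcases Nat.lt_or_ge ((xs.length - 1) % m.toNat + 1) m.toNat with hlt2 | hge
            · rw [Nat.mod_eq_of_lt hlt2] at hkey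
              exact hkey
            · exfalso
              have heq : (xs.length - 1) % m.toNat + 1 = m.toNat := by omega
              rw [heq, Nat.mod_self] at hkey
              exact hr hkey.symm
          rw [tail_drop_eq, harith]
  exact H xs.length xs rfl

theorem foldl_add_sum (L : List Int) (f : Int → Int) (init : Int) :
    L.foldl (fun a i => a + f i) init = init + (L.map f).sum := by
  induction L generalizing init with
  | nil => simp
  | cons x xs ihx => simp [List.foldl_cons, ihx]; ring

theorem pyGetD_drop (S : List Int) (rn : Nat) (i : Int) (hi : 0 ≤ i) (d : Int) :
    PySem.List.pyGetD (S.drop rn) i d = PySem.List.pyGetD S ((rn : Int) + i) d := by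
  rw [PySem.List.pyGetD_of_nonneg _ _ hi, PySem.List.pyGetD_of_nonneg _ _ (by omega)]
  have ht : ((rn : Int) + i).toNat = rn + i.toNat := by omega
  rw [ht]
  simp [List.getD_eq_getElem?_getD, List.getElem?_drop]

theorem pyRange_neg_step_nil (a b m : Int) (hm : m < 0) (hab : a ≤ b) :
    PySem.List.pyRange a b m = [] := by
  unfold PySem.List.pyRange
  rw [if_neg (by omega)]
  rw [if_neg (by omega), if_neg (by omega)]
  simp

theorem solution_spec : Claim_equal_solution := by
  intro k m score _ hpre
  unfold Spec_solution solution solution_alt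
  simp only []
  by_cases hm : 0 < m
  · -- positive step
    have hmm : m = ((m.toNat : Nat) : Int) := by omega
    set S := PySem.List.sorted score (fun x => x) with hSdef
    have hlenS : S.length = score.length :=
      (PySem.List.sorted_perm score (fun x => x) false).length_eq
    set M := m.toNat with hMdef
    set rn := score.length % M with hrndef
    have hA : PySem.List.sorted (aLoop m score) (fun x => x) = S.drop rn :=
      aLoop_sorted m hm score
    rw [hA]
    have hmodcast : PySem.Int.mod (S.length : Int) m = (rn : Int) := by
      rw [hlenS, hmm, PySem.Int.mod_natCast]
    rw [hmodcast]
    have hlen2 : ((S.drop rn).length : Int) = (S.length : Int) - (rn : Int) := by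
      have hrle : rn ≤ S.length := by
        rw [hlenS]; exact Nat.mod_le _ _
      simp [List.length_drop]
      omega
    rw [foldl_add_sum, foldl_add_sum]
    congr 1
    -- reduce the two ranges with pyRange_of_pos
    rw [PySem.List.pyRange_of_pos _ _ hm, PySem.List.pyRange_of_pos _ _ hm]
    have hrle : rn ≤ S.length := by rw [hlenS]; exact Nat.mod_le _ _
    have hcount : (if (0:Int) < ((S.drop rn).length : Int) then
          ((((S.drop rn).length : Int) - 0 + m - 1) / m).toNat else 0)
        = (if ((rn : Int)) < (S.length : Int) then
          (((S.length : Int) - (rn : Int) + m - 1) / m).toNat else 0) := by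
      rw [hlen2]
      by_cases hlt : ((rn : Int)) < (S.length : Int)
      · rw [if_pos (by omega), if_pos hlt]
        ring_nf
      · rw [if_neg (by omega), if_neg hlt]
    rw [hcount]
    rw [List.map_map, List.map_map]
    congr 1
    apply List.map_congr_left
    intro j _
    simp only [Function.comp]
    have hj0 : (0 : Int) ≤ m * (j : Int) := by positivity
    rw [show (0 : Int) + m * (j : Int) = m * (j : Int) by ring]
    rw [pyGetD_drop S rn (m * (j : Int)) hj0 0]
  · -- negative step: both ranges are empty
    have hmneg : m < 0 := by
      rcases lt_trichotomy m 0 with h | h | h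
      · exact h
      · exact absurd h hpre
      · exact absurd h hm
    have h1 : PySem.List.pyRange 0 ((PySem.List.sorted (aLoop m score) (fun x => x)).length : Int) m = [] :=
      pyRange_neg_step_nil _ _ _ hmneg (by positivity)
    have hr := (PySem.Int.mod_neg_bounds ((PySem.List.sorted score (fun x => x)).length : Int) hmneg).2
    have h2 : PySem.List.pyRange (PySem.Int.mod ((PySem.List.sorted score (fun x => x)).length : Int) m)
        ((PySem.List.sorted score (fun x => x)).length : Int) m = [] :=
      pyRange_neg_step_nil _ _ _ hmneg
        (by have h0 : (0:Int) ≤ ((PySem.List.sorted score (fun x => x)).length : Int) := Int.natCast_nonneg _; omega)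
    rw [h1, h2]
    rfl
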